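-- pv_equiv track=rewrite | github.com/mhmdghsn1/foundations-cs-python | assignment_03_Mohamad_Ghosn.py | find_common_majors
-- ===== SOURCE A (Python) =====
-- def find_common_majors(data):  #same major
--     majors = {}
--     for student in data:
--         major = student["Major"]
--         if major in majors:
--             majors[major] += 1
--         else:
--             majors[major] = 1
--     common_majors = []
--     for major, count in majors.items():
--         if count > 1:
--             common_majors.append(major)
--     return common_majors
-- ===== SOURCE B (Python) =====
-- def find_common_majors(data):
--     seen = set()
--     dups = set()
--     for student in data:
--         major = student["Major"]
--         if major in seen:
--             dups.add(major)
--         else: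
--             seen.add(major)
--     result = []
--     emitted = set()
--     for student in data:
--         major = student["Major"]
--         if major in dups and major not in emitted:
--             result.append(major)
--             emitted.add(major)
--     return result
-- ===== Notes on version B (the rewrite author's own statement) =====
-- stated objective: alternative
-- what changed: Replaces the count-dictionary-then-iterate-items structure by two set-based passes: the first pass computes the set of majors seen more than once, the second re-scans the input emitting each such major at its first appearance.
import Mathlib
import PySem

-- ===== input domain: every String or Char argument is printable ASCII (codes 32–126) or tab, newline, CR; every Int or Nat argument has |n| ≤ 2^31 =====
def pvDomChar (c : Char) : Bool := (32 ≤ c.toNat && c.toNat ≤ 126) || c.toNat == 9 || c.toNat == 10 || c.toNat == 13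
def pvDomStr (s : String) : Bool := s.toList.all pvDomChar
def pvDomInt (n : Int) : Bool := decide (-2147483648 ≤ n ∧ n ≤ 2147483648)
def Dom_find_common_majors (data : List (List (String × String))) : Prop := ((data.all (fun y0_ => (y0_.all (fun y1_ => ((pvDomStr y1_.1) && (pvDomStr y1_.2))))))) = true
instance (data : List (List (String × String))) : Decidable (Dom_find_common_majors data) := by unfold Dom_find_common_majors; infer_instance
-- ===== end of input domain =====

-- B replaces A's count-dict-then-iterate-items structure by two set passes (majors seen twice,
-- then a re-scan of the input emitting each such major at its first appearance); alternative, same cost.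

-- ===== PORT A =====
def find_common_majors (data : List (List (String × String))) : List String :=
  let majors := data.foldl (fun (majors : PySem.Dict String Int) student =>
    let major := PySem.Dict.getD (PySem.Dict.mk student) "Major" ""
    if majors.contains major then
      majors.insert major (majors.getD major 0 + 1)   -- majors[major] += 1
    else
      majors.insert major 1) (PySem.Dict.mk [])
  majors.items.foldl (fun common_majors mc =>
    if mc.2 > 1 then common_majors ++ [mc.1] else common_majors) []

-- ===== PORT B =====
def find_common_majors_alt (data : List (List (String × String))) : List String :=
  let sd := data.foldl (fun (sd : PySem.Set String × PySem.Set String) student =>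
    let major := PySem.Dict.getD (PySem.Dict.mk student) "Major" ""
    if PySem.Set.contains sd.1 major then (sd.1, PySem.Set.add sd.2 major)
    else (PySem.Set.add sd.1 major, sd.2)) (PySem.Set.empty, PySem.Set.empty)
  (data.foldl (fun (re : List String × PySem.Set String) student =>
    let major := PySem.Dict.getD (PySem.Dict.mk student) "Major" ""
    if PySem.Set.contains sd.2 major && !(PySem.Set.contains re.2 major) then
      (re.1 ++ [major], PySem.Set.add re.2 major)
    else re) (([] : List String), PySem.Set.empty)).1

-- ===== PRECONDITION & SPEC =====
-- Pre_ excludes exactly the students without a "Major" key, on which Python A (and B) raise KeyError.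
def Pre_find_common_majors (data : List (List (String × String))) : Prop :=
  (data.all (fun student => PySem.Dict.contains (PySem.Dict.mk student) "Major")) = true
instance (data : List (List (String × String))) : Decidable (Pre_find_common_majors data) := by
  unfold Pre_find_common_majors; infer_instance

def pvWitness_find_common_majors : (List (List (String × String))) :=
  [[("Major", "CS"), ("Name", "Ann")], [("Major", "CS")], [("Major", "Math")]]

def Spec_find_common_majors (data : List (List (String × String))) (out : List String) : Prop := out = find_common_majors_alt data
instance (data : List (List (String × String))) (out : List String) : Decidable (Spec_find_common_majors data out) := by unfold Spec_find_common_majors; infer_instance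

-- ===== CLAIM (what is proved, stated in full; the proofs are below) =====
def Claim_equal_find_common_majors : Prop := ∀ (data : List (List (String × String))), Dom_find_common_majors data → Pre_find_common_majors data → Spec_find_common_majors data (find_common_majors data)

-- ===== LEMMAS AND PROOFS =====

-- the major of one student record, as both ports read it
def majorOf (student : List (String × String)) : String :=
  PySem.Dict.getD (PySem.Dict.mk student) "Major" ""

-- A's counting loop over the records is the plain counting fold over the list of majors
theorem foldA_eq (data : List (List (String × String))) (init : PySem.Dict String Int) :
    data.foldl (fun d student =>
      let m := PySem.Dict.getD (PySem.Dict.mk student) "Major" ""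
      if d.contains m then d.insert m (d.getD m 0 + 1) else d.insert m 1) init
    = (data.map majorOf).foldl (fun (d : PySem.Dict String Int) m => d.insert m (d.getD m 0 + 1)) init := by
  induction data generalizing init with
  | nil => rfl
  | cons a t ih =>
      simp only [List.foldl_cons, List.map_cons]
      rw [ih]
      have hm : PySem.Dict.getD (PySem.Dict.mk a) "Major" "" = majorOf a := rfl
      rw [hm]
      by_cases h : init.contains (majorOf a)
      · simp [h]
      · have h' : init.contains (majorOf a) = false := by simpa using h
        simp [h', PySem.Dict.getD_of_not_contains init 0 h']

-- filtering commutes with building a set by repeated add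
theorem filter_foldl_add (l : List String) (p : String → Bool) :
    ∀ (s : PySem.Set String),
    (l.foldl PySem.Set.add s).filter p = (l.filter p).foldl PySem.Set.add (s.filter p) := by
  induction l with
  | nil => intro s; rfl
  | cons a t ih =>
      intro s
      simp only [List.foldl_cons, List.filter_cons]
      rw [ih]
      by_cases hm : a ∈ s
      · by_cases hp : p a
        · rw [PySem.Set.add_of_mem hm]
          have : a ∈ List.filter p s := List.mem_filter.mpr ⟨hm, hp⟩
          simp [hp, PySem.Set.add_of_mem this]
        · simp [hp, PySem.Set.add_of_mem hm]
      · rw [PySem.Set.add_of_not_mem hm]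
        have hnf : a ∉ List.filter p s := fun h => hm (List.mem_filter.mp h).1
        by_cases hp : p a
        · simp [hp, List.filter_append, PySem.Set.add_of_not_mem hnf]
        · simp [hp, List.filter_append]

-- a set built by adds keeps its start as a prefix
theorem foldl_add_prefix (l : List String) :
    ∀ (s : PySem.Set String), s <+: l.foldl PySem.Set.add s := by
  induction l with
  | nil => intro s; exact List.prefix_refl s
  | cons a t ih =>
      intro s
      refine List.IsPrefix.trans ?_ (ih (PySem.Set.add s a))
      rw [PySem.Set.add_eq_ite]
      by_cases hm : a ∈ s
      · simp [hm]
      · simp [hm]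

-- membership in the `dups` set of B's first pass, over an arbitrary accumulator
theorem pass1_mem (l : List String) :
    ∀ (s d : PySem.Set String) (x : String),
    x ∈ (l.foldl (fun sd m =>
          if PySem.Set.contains sd.1 m then (sd.1, PySem.Set.add sd.2 m)
          else (PySem.Set.add sd.1 m, sd.2)) (s, d)).2
    ↔ x ∈ d ∨ (x ∈ s ∧ 1 ≤ l.count x) ∨ 2 ≤ l.count x := by
  induction l with
  | nil => intro s d x; simp
  | cons a t ih =>
      intro s d x
      simp only [List.foldl_cons]
      by_cases h : PySem.Set.contains s a
      · have ha : a ∈ s := (PySem.Set.contains_iff s a).mp h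
        rw [if_pos h, ih, PySem.Set.mem_add]
        by_cases hx : x = a
        · subst hx
          rw [List.count_cons_self]
          constructor
          · intro _; exact Or.inr (Or.inl ⟨ha, by omega⟩)
          · intro _; exact Or.inl (Or.inr rfl)
        · rw [List.count_cons_of_ne (Ne.symm hx)]
          tauto
      · have ha : a ∉ s := fun hm => h ((PySem.Set.contains_iff s a).mpr hm)
        rw [if_neg h, ih]
        by_cases hx : x = a
        · subst hx
          rw [List.count_cons_self, PySem.Set.mem_add]
          constructor
          · rintro (hd | ⟨_, hc⟩ | hc)
            · exact Or.inl hd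
            · exact Or.inr (Or.inr (by omega))
            · exact Or.inr (Or.inr (by omega))
          · rintro (hd | ⟨hs, _⟩ | hc)
            · exact Or.inl hd
            · exact absurd hs ha
            · exact Or.inr (Or.inl ⟨Or.inr rfl, by omega⟩)
        · rw [List.count_cons_of_ne (Ne.symm hx), PySem.Set.mem_add]
          tauto

-- B's second pass ignores majors that are not in `dups`
theorem pass2_skip (dups : PySem.Set String) (l : List String) :
    ∀ (res : List String) (em : PySem.Set String),
    l.foldl (fun re m =>
        if PySem.Set.contains dups m && !(PySem.Set.contains re.2 m) then
          (re.1 ++ [m], PySem.Set.add re.2 m)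
        else re) (res, em)
    = (l.filter (fun m => PySem.Set.contains dups m)).foldl (fun re m =>
        if PySem.Set.contains dups m && !(PySem.Set.contains re.2 m) then
          (re.1 ++ [m], PySem.Set.add re.2 m)
        else re) (res, em) := by
  induction l with
  | nil => intro res em; rfl
  | cons a t ih =>
      intro res em
      by_cases h : PySem.Set.contains dups a
      · simp only [List.filter_cons, h, if_pos, List.foldl_cons]
        split
        · exact ih _ _
        · exact ih _ _
      · have h' : PySem.Set.contains dups a = false := by simpa using h
        simp only [List.filter_cons, h', Bool.false_and, Bool.false_eq_true, if_false,
          List.foldl_cons]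
        exact ih _ _

-- B's second pass over majors that are all in `dups` emits the fresh ones in order
theorem pass2_emit (dups : PySem.Set String) (l : List String)
    (hall : ∀ m ∈ l, PySem.Set.contains dups m = true) :
    ∀ (res : List String) (em : PySem.Set String),
    (l.foldl (fun re m =>
        if PySem.Set.contains dups m && !(PySem.Set.contains re.2 m) then
          (re.1 ++ [m], PySem.Set.add re.2 m)
        else re) (res, em)).1
    = res ++ (l.foldl PySem.Set.add em).drop em.length := by
  induction l with
  | nil => intro res em; simp
  | cons a t ih =>
      intro res em
      have h1 : PySem.Set.contains dups a = true := hall a (List.mem_cons_self ..)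
      have hallt : ∀ m ∈ t, PySem.Set.contains dups m = true :=
        fun m hm => hall m (List.mem_cons_of_mem a hm)
      simp only [List.foldl_cons]
      by_cases hm : a ∈ em
      · have hc : PySem.Set.contains em a = true := (PySem.Set.contains_iff em a).mpr hm
        rw [PySem.Set.add_of_mem hm]
        simp only [h1, hc, Bool.not_true, Bool.and_false]
        exact ih hallt res em
      · have hc : PySem.Set.contains em a = false := by
          by_contra h
          exact hm ((PySem.Set.contains_iff em a).mp (by simpa using h))
        rw [PySem.Set.add_of_not_mem hm]
        simp only [h1, hc, Bool.not_false, Bool.and_true, if_true]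
        rw [ih hallt (res ++ [a]) (em ++ [a])]
        obtain ⟨u, hu⟩ := foldl_add_prefix t (em ++ [a])
        rw [← hu]
        have h2 : (em ++ [a] ++ u).drop em.length = [a] ++ u := by
          rw [List.append_assoc]; exact List.drop_left ..
        have h3 : (em ++ [a] ++ u).drop (em ++ [a]).length = u := List.drop_left ..
        rw [h2, h3]
        simp


-- A computes the first-appearance-ordered majors with count ≥ 2
theorem ports_agree (data : List (List (String × String))) :
    find_common_majors data = find_common_majors_alt data := by
  -- ===== A side =====
  rw [show find_common_majors data =
      (data.foldl (fun (d : PySem.Dict String Int) student =>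
        let m := PySem.Dict.getD (PySem.Dict.mk student) "Major" ""
        if d.contains m then d.insert m (d.getD m 0 + 1) else d.insert m 1) (PySem.Dict.mk [])).items.foldl
        (fun acc mc => if mc.2 > 1 then acc ++ [mc.1] else acc) [] from rfl]
  rw [foldA_eq]
  have hnd : ((data.map majorOf).foldl (fun (d : PySem.Dict String Int) m => d.insert m (d.getD m 0 + 1)) (PySem.Dict.mk [])).keys.Nodup :=
    PySem.Dict.nodup_keys_foldl_insert (data.map majorOf) (fun d m => d.getD m 0 + 1)
      (PySem.Dict.mk []) (by simp [PySem.Dict.keys])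
  have hkeys : ((data.map majorOf).foldl (fun (d : PySem.Dict String Int) m => d.insert m (d.getD m 0 + 1)) (PySem.Dict.mk [])).keys
      = (data.map majorOf).foldl PySem.Set.add [] := by
    rw [PySem.Dict.keys_foldl_insert (data.map majorOf) (fun d m => d.getD m 0 + 1) (PySem.Dict.mk [])]
    rfl
  have hget : ∀ k, ((data.map majorOf).foldl (fun (d : PySem.Dict String Int) m => d.insert m (d.getD m 0 + 1)) (PySem.Dict.mk [])).getD k 0
      = ((data.map majorOf).count k : Int) := by
    intro k
    have := PySem.Dict.getD_foldl_insert_add_one (data.map majorOf) (PySem.Dict.mk []) k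
    have h0 : (PySem.Dict.mk [] : PySem.Dict String Int).getD k 0 = 0 := rfl
    rw [h0, zero_add] at this
    exact this
  rw [PySem.Dict.items_eq_map_keys _ hnd 0, List.foldl_map]
  have hfa := PySem.List.foldl_append_if
    (fun k => decide ((1:Int) < ((data.map majorOf).foldl (fun (d : PySem.Dict String Int) m => d.insert m (d.getD m 0 + 1)) (PySem.Dict.mk [])).getD k 0))
    (fun k => k)
    ((data.map majorOf).foldl (fun (d : PySem.Dict String Int) m => d.insert m (d.getD m 0 + 1)) (PySem.Dict.mk [])).keys ([] : List String)
  simp only [decide_eq_true_eq] at hfa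
  rw [show (fun (acc : List String) k =>
        if (k, ((data.map majorOf).foldl (fun (d : PySem.Dict String Int) m => d.insert m (d.getD m 0 + 1)) (PySem.Dict.mk [])).getD k 0).2 > 1
        then acc ++ [(k, ((data.map majorOf).foldl (fun (d : PySem.Dict String Int) m => d.insert m (d.getD m 0 + 1)) (PySem.Dict.mk [])).getD k 0).1]
        else acc)
      = (fun (acc : List String) k =>
        if (1:Int) < ((data.map majorOf).foldl (fun (d : PySem.Dict String Int) m => d.insert m (d.getD m 0 + 1)) (PySem.Dict.mk [])).getD k 0
        then acc ++ [k] else acc) from rfl]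
  rw [hfa, hkeys]
  have hpred : (fun k => decide ((1:Int) < ((data.map majorOf).foldl (fun (d : PySem.Dict String Int) m => d.insert m (d.getD m 0 + 1)) (PySem.Dict.mk [])).getD k 0))
      = (fun k => decide (2 ≤ (data.map majorOf).count k)) := by
    funext k
    rw [hget k]
    simp only [decide_eq_decide]
    omega
  rw [hpred, filter_foldl_add]
  -- A = ((data.map majorOf).filter (fun m => decide (2 ≤ count))).foldl add []
  -- ===== B side =====
  have hB : find_common_majors_alt data =
      (let dups := ((data.map majorOf).foldl (fun sd m =>
          if PySem.Set.contains sd.1 m then (sd.1, PySem.Set.add sd.2 m)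
          else (PySem.Set.add sd.1 m, sd.2)) (PySem.Set.empty, PySem.Set.empty)).2
       ((data.map majorOf).foldl (fun re m =>
          if PySem.Set.contains dups m && !(PySem.Set.contains re.2 m) then
            (re.1 ++ [m], PySem.Set.add re.2 m)
          else re) (([] : List String), PySem.Set.empty)).1) := by
    unfold find_common_majors_alt
    simp only [List.foldl_map, majorOf]
  rw [hB]
  simp only []
  rw [pass2_skip]
  rw [pass2_emit _ _ (fun m hm => (List.mem_filter.mp hm).2)]
  simp only [List.nil_append]
  -- now both sides are foldl add [] over a filtered major list; equate the filters
  have hd : ∀ m, PySem.Set.contains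
      ((data.map majorOf).foldl (fun sd m =>
        if PySem.Set.contains sd.1 m then (sd.1, PySem.Set.add sd.2 m)
        else (PySem.Set.add sd.1 m, sd.2)) (PySem.Set.empty, PySem.Set.empty)).2 m
      = decide (2 ≤ (data.map majorOf).count m) := by
    intro m
    have h1 : m ∈ ((data.map majorOf).foldl (fun sd m =>
        if PySem.Set.contains sd.1 m then (sd.1, PySem.Set.add sd.2 m)
        else (PySem.Set.add sd.1 m, sd.2)) (PySem.Set.empty, PySem.Set.empty)).2
        ↔ 2 ≤ (data.map majorOf).count m := by
      have := pass1_mem (data.map majorOf) PySem.Set.empty PySem.Set.empty m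
      simpa [PySem.Set.empty] using this
    by_cases h : 2 ≤ (data.map majorOf).count m
    · rw [(PySem.Set.contains_iff _ m).mpr (h1.mpr h), decide_eq_true h]
    · rw [decide_eq_false h, ← Bool.not_eq_true]
      intro hc
      exact h (h1.mp ((PySem.Set.contains_iff _ m).mp hc))
  rw [List.filter_congr (fun m _ => hd m)]
  simp [PySem.Set.empty]

-- ===== VERDICT (by name: the statement is the Claim_ definition above) =====
theorem find_common_majors_spec : Claim_equal_find_common_majors := by
  intro data _ _
  exact ports_agree data
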